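-- pv_equiv track=rewrite | github.com/TIDTeam/modeCSS | Lib.py | calc
-- ===== SOURCE A (Python) =====
-- def calc(path_a_,path_b_):
--     ''' 路径转换
--         path_a_：要转换的相对路径
--         path_b_：绝对路径
--     '''
--     l = ["..",".",""]
--     _path_a_ = path_a_
--     _path_b_ = path_b_
--     for v in path_a_:
--         if v in l:
--             if v == "..":
--                 _path_b_ = _path_b_[:-1]
--                 _path_a_ = _path_a_[1:]
--             elif v == ".":
--                 _path_a_ = _path_a_[1:]
--             elif v == "":
--                 return "\\".join(_path_b_)
--         else:
--             c = v.split(":")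
--             if len(c)>1:
--                 return "\\".join(_path_a_)
--     return "\\".join(_path_b_) + "\\" + "\\".join(_path_a_)
-- ===== SOURCE B (Python) =====
-- def calc(path_a_, path_b_):
--     ''' Same conversion, one pass: count front/back trims with two integers,
--         slice and join once at the point of return (no per-step list copies). '''
--     drop_a = 0
--     drop_b = 0
--     for v in path_a_:
--         if v == "..":
--             drop_a += 1
--             drop_b += 1
--         elif v == ".":
--             drop_a += 1
--         elif v == "":
--             return "\\".join(path_b_[:max(0, len(path_b_) - drop_b)])
--         elif ":" in v:
--             return "\\".join(path_a_[drop_a:])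
--     return "\\".join(path_b_[:max(0, len(path_b_) - drop_b)]) + "\\" + "\\".join(path_a_[drop_a:])
-- ===== Notes on version B (the rewrite author's own statement) =====
-- stated objective: alternative
-- what changed: Replaces A's per-iteration list slicing (_path_a_[1:], _path_b_[:-1] rebuilt each step) by a single pass that only increments two integer trim counters and does one slice+join at the point of return; intended to avoid the per-step copies, measured only ~1.26x at the largest size, so no speed is claimed.
import Mathlib
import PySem

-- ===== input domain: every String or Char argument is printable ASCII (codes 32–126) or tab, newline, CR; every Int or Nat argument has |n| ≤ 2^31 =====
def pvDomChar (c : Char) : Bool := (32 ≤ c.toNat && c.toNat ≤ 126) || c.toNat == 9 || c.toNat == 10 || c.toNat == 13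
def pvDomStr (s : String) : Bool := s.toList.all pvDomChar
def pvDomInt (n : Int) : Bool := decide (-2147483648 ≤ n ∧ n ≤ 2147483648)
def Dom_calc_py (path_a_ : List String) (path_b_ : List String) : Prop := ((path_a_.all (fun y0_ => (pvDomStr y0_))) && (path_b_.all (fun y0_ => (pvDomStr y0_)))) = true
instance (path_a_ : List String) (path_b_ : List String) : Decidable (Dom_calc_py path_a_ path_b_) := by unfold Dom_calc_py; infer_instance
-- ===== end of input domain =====

-- ===== PORT A =====
-- B is a one-pass rewrite of A: two trim counters and a single slice/join at the
-- point of return, instead of A's per-step list slicing (equivalence of return values).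
-- literal port of A: loop over the original path_a_ with mutable copies _path_a_, _path_b_
def calcALoop : List String → List String → List String → String
  | [], pa, pb => PySem.Str.join "\\" pb ++ "\\" ++ PySem.Str.join "\\" pa
  | v :: vs, pa, pb =>
    if v = ".." ∨ v = "." ∨ v = "" then
      if v = ".." then
        calcALoop vs (PySem.List.slice pa (some 1) none) (PySem.List.slice pb none (some (-1)))
      else if v = "." then
        calcALoop vs (PySem.List.slice pa (some 1) none) pb
      else
        PySem.Str.join "\\" pb
    else
      -- c = v.split(":"); if len(c) > 1: return "\\".join(_path_a_)
      if (PySem.Chars.splitOn v.toList [':']).length > 1 then PySem.Str.join "\\" pa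
      else calcALoop vs pa pb

def calc_py (path_a_ : List String) (path_b_ : List String) : String :=
  calcALoop path_a_ path_a_ path_b_

-- ===== PORT B =====
-- literal port of Source B; path_b_[:max(0, len-db)] is List.take (len - db) (Nat subtraction
-- clamps at 0 exactly like max(0, ...)), path_a_[drop_a:] with drop_a ≥ 0 is List.drop.
def calcBLoop (pa0 pb0 : List String) : List String → Nat → Nat → String
  | [], da, db =>
    PySem.Str.join "\\" (pb0.take (pb0.length - db)) ++ "\\" ++ PySem.Str.join "\\" (pa0.drop da)
  | v :: vs, da, db =>
    if v = ".." then calcBLoop pa0 pb0 vs (da + 1) (db + 1)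
    else if v = "." then calcBLoop pa0 pb0 vs (da + 1) db
    else if v = "" then PySem.Str.join "\\" (pb0.take (pb0.length - db))
    else if PySem.Str.isIn ":" v then PySem.Str.join "\\" (pa0.drop da)
    else calcBLoop pa0 pb0 vs da db

def calc_py_alt (path_a_ : List String) (path_b_ : List String) : String :=
  calcBLoop path_a_ path_b_ path_a_ 0 0

-- ===== PRECONDITION & SPEC =====
def Spec_calc_py (path_a_ : List String) (path_b_ : List String) (out : String) : Prop := out = calc_py_alt path_a_ path_b_
instance (path_a_ : List String) (path_b_ : List String) (out : String) : Decidable (Spec_calc_py path_a_ path_b_ out) := by unfold Spec_calc_py; infer_instance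

-- ===== CLAIM (what is proved, stated in full; the proofs are below) =====
def Claim_equal_calc_py : Prop := ∀ (path_a_ : List String) (path_b_ : List String), Dom_calc_py path_a_ path_b_ → Spec_calc_py path_a_ path_b_ (calc_py path_a_ path_b_)

-- ===== LEMMAS AND PROOFS =====

lemma dropLast_take_of_le {α : Type} {n : Nat} {l : List α} (h : n ≤ l.length) :
    (l.take n).dropLast = l.take (n - 1) := by
  rw [List.dropLast_eq_take, List.take_take, List.length_take]; congr 1; omega

-- len(v.split(":")): splitOn.go on separator [':'] yields acc.length + 1 + (count of ':' in l) pieces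
lemma splitOn_go_colon_length (fuel : Nat) : ∀ (l cur : List Char) (acc : List (List Char)),
    l.length < fuel →
    (PySem.Chars.splitOn.go [':'] fuel l cur acc).length = acc.length + 1 + l.count ':' := by
  induction fuel with
  | zero => intro l cur acc h; omega
  | succ n ih =>
    intro l cur acc h
    cases l with
    | nil => simp [PySem.Chars.splitOn.go]
    | cons c rest =>
      simp only [PySem.Chars.splitOn.go]
      by_cases hc : c = ':'
      · subst hc
        simp only [List.isPrefixOf, BEq.rfl, Bool.true_and, if_pos]
        rw [ih]
        · simp; omega
        · simpa using Nat.lt_of_succ_lt_succ h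
      · have hpre : [':'].isPrefixOf (c :: rest) = false := by
          simp [List.isPrefixOf]
          exact fun hh => (hc hh.symm).elim
        rw [hpre]
        simp only [Bool.false_eq_true, if_false]
        rw [ih rest (c :: cur) acc (Nat.lt_of_succ_lt_succ h)]
        simp [hc]

-- A's test len(v.split(":")) > 1 is B's test ":" in v
lemma splitOn_colon_iff_isIn (v : String) :
    ((PySem.Chars.splitOn v.toList [':']).length > 1) ↔ PySem.Str.isIn ":" v = true := by
  rw [PySem.Chars.splitOn, splitOn_go_colon_length _ _ _ _ (Nat.lt_succ_self _)]
  rw [PySem.Str.isIn_iff_infix]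
  have h1 : (":".toList : List Char) = [':'] := rfl
  rw [h1, List.singleton_infix_iff]
  rw [← List.count_pos_iff]
  simp only [List.length_nil]
  omega

-- loop invariant: A's trimmed state is B's counters applied to the originals
lemma loop_eq (pa0 pb0 : List String) : ∀ (vs : List String) (da db : Nat),
    calcALoop vs (pa0.drop da) (pb0.take (pb0.length - db)) = calcBLoop pa0 pb0 vs da db := by
  intro vs
  induction vs with
  | nil => intro da db; rfl
  | cons v rest ih =>
    intro da db
    by_cases h2 : v = ".."
    · subst h2
      simp only [calcALoop, calcBLoop,
        PySem.List.slice_from_one, PySem.List.slice_to_neg_one, List.tail_drop, ite_true]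
      rw [dropLast_take_of_le (Nat.sub_le _ _),
        show pb0.length - db - 1 = pb0.length - (db + 1) from by omega]
      exact ih (da + 1) (db + 1)
    · by_cases h1 : v = "."
      · subst h1
        simp only [calcALoop, calcBLoop, show ("." : String) ≠ ".." from by decide,
          PySem.List.slice_from_one, List.tail_drop]
        exact ih (da + 1) db
      · by_cases h0 : v = ""
        · subst h0
          simp [calcALoop, calcBLoop, show ("" : String) ≠ ".." from by decide,
            show ("" : String) ≠ "." from by decide]
        · simp only [calcALoop, calcBLoop, h2, h1, h0]
          by_cases hc : (PySem.Chars.splitOn v.toList [':']).length > 1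
          · have hin : PySem.Str.isIn ":" v = true := (splitOn_colon_iff_isIn v).mp hc
            have hin' : PySem.Chars.isIn [':'] v.toList = true := by
              simpa [PySem.Str.isIn] using hin
            simp [hc, hin']
          · have hin : ¬ PySem.Str.isIn ":" v = true :=
              fun h => hc ((splitOn_colon_iff_isIn v).mpr h)
            have hin' : PySem.Chars.isIn [':'] v.toList = false := by
              have := hin; simp only [PySem.Str.isIn] at this; simpa using this
            simp [hc, hin', ih]

-- ===== VERDICT (by name: the statement is the Claim_ definition above) =====
theorem calc_py_spec : Claim_equal_calc_py := by
  intro pa pb _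
  unfold Spec_calc_py calc_py calc_py_alt
  simpa using loop_eq pa pb pa 0 0
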